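-- pv_equiv track=rewrite | github.com/imsoncod/Python-Algorithm | Programmers/최고의 집합.py | solution
-- ===== SOURCE A (Python) =====
-- def solution(n, s):
--     if s==1 or n>s: return [-1]
--     ans = []
--     while n!=0:
--         ans.append(s//n)
--         s-=ans[-1]
--         n-=1
--     return ans
-- ===== SOURCE B (Python) =====
-- def solution(n, s):
--     if s == 1 or n > s:
--         return [-1]
--     if n == 0:
--         return []
--     q, r = divmod(s, n)
--     return [q] * (n - r) + [q + 1] * r
-- ===== Notes on version B (the rewrite author's own statement) =====
-- stated objective: simpler
-- what changed: Replaces the greedy while-loop with a closed form: after the guards, the answer is exactly (n-r) copies of q and r copies of q+1 where q, r = divmod(s, n).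
import Mathlib
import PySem

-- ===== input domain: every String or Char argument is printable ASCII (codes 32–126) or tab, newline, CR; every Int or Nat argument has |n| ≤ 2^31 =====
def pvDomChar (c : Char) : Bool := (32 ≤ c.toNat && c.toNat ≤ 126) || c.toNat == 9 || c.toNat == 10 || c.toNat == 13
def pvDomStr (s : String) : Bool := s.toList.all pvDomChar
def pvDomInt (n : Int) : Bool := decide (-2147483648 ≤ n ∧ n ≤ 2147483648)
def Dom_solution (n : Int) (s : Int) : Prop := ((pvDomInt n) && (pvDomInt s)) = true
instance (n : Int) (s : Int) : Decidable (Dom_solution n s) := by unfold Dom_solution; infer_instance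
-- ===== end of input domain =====

-- B replaces A's greedy while-loop by the closed form [q]*(n-r) ++ [q+1]*r with (q,r) = divmod(s,n): simpler, constant-time arithmetic.


-- ===== PORT A =====
-- the while loop, run with fuel = n.toNat (= number of iterations Python performs when 0 ≤ n;
-- for n < 0 with n ≤ s Python diverges, excluded by Pre_solution)
def solutionLoop : Nat → Int → Int → List Int → List Int
  | 0, _, _, ans => ans
  | k + 1, n, s, ans =>
    let q := PySem.Int.floordiv s n
    solutionLoop k (n - 1) (s - q) (ans ++ [q])

def solution (n : Int) (s : Int) : List Int :=
  if s = 1 ∨ n > s then [-1]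
  else solutionLoop n.toNat n s []

-- ===== PORT B =====
def solution_alt (n : Int) (s : Int) : List Int :=
  if s = 1 ∨ n > s then [-1]
  else if n = 0 then []
  else
    let q := PySem.Int.floordiv s n
    let r := PySem.Int.mod s n
    List.replicate (n - r).toNat q ++ List.replicate r.toNat (q + 1)

-- ===== PRECONDITION & SPEC =====
-- Pre_ excludes only inputs where A never returns: for n < 0 with n ≤ s and s ≠ 1 the while loop runs forever.
def Pre_solution (n : Int) (s : Int) : Prop := 0 ≤ n ∨ s < n ∨ s = 1
instance (n : Int) (s : Int) : Decidable (Pre_solution n s) := by unfold Pre_solution; infer_instance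
def pvWitness_solution : Int × Int := (3, 11)

def Spec_solution (n : Int) (s : Int) (out : List Int) : Prop := out = solution_alt n s
instance (n : Int) (s : Int) (out : List Int) : Decidable (Spec_solution n s out) := by unfold Spec_solution; infer_instance

-- ===== CLAIM (what is proved, stated in full; the proofs are below) =====
def Claim_equal_solution : Prop := ∀ (n : Int) (s : Int), Dom_solution n s → Pre_solution n s → Spec_solution n s (solution n s)

-- ===== LEMMAS AND PROOFS =====

-- accumulator discharge
lemma solutionLoop_acc (k : Nat) : ∀ (n s : Int) (ans : List Int),
    solutionLoop k n s ans = ans ++ solutionLoop k n s [] := by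
  induction k with
  | zero => intro n s ans; simp [solutionLoop]
  | succ k ih =>
    intro n s ans
    simp only [solutionLoop]
    rw [ih (n-1) _ (ans ++ _), ih (n-1) _ ([] ++ _)]
    simp

-- the greedy loop equals the closed form, for fuel k ≥ 1 and n = k
lemma solutionLoop_closed : ∀ (k : Nat) (s : Int), 1 ≤ k →
    solutionLoop k (k : Int) s [] =
      List.replicate (((k : Int) - s % (k : Int))).toNat (s / (k : Int)) ++
      List.replicate (s % (k : Int)).toNat (s / (k : Int) + 1) := by
  intro k
  induction k with
  | zero => intro s h; omega
  | succ k ih =>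
    intro s _
    have hk1 : (0:Int) < (k+1 : Nat) := by positivity
    rw [show solutionLoop (k+1) ((k+1:Nat):Int) s [] =
          solutionLoop k (((k+1:Nat):Int) - 1) (s - PySem.Int.floordiv s ((k+1:Nat):Int))
            ([] ++ [PySem.Int.floordiv s ((k+1:Nat):Int)]) from rfl,
        solutionLoop_acc k, PySem.Int.floordiv_eq_ediv_of_pos hk1]
    rcases Nat.eq_zero_or_pos k with hk0 | hkpos
    · subst hk0
      have h1 : s % (1:Int) = 0 := Int.emod_one s
      simp [solutionLoop, h1]
    · -- k ≥ 1 : apply IH to s' = s - s/(k+1)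
      set q : Int := s / ((k+1 : Nat) : Int) with hq
      set r : Int := s % ((k+1 : Nat) : Int) with hr
      have hdec : ((k+1 : Nat) : Int) * q + r = s := by
        rw [hq, hr]; exact Int.mul_ediv_add_emod s _
      have hr0 : 0 ≤ r := Int.emod_nonneg s (by omega)
      have hrlt : r < ((k+1 : Nat) : Int) := Int.emod_lt_of_pos s hk1
      have hkpos' : (0:Int) < (k : Nat) := by exact_mod_cast hkpos
      have hn1 : ((k+1 : Nat) : Int) - 1 = (k : Nat) := by push_cast; ring
      rw [hn1, ih (s - q) hkpos]
      have hs' : s - q = (k : Int) * q + r := by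
        push_cast at hdec ⊢; linear_combination -hdec
      rcases lt_or_eq_of_le (by omega : r ≤ (k : Int)) with hcase | hcase
      · -- r < k : quotient stays q, remainder stays r
        have hdiv : (s - q) / (k : Int) = q := by
          rw [hs', add_comm, mul_comm, Int.add_mul_ediv_right _ _ (by omega : (k:Int) ≠ 0),
              Int.ediv_eq_zero_of_lt hr0 hcase]
          omega
        have hmod : (s - q) % (k : Int) = r := by
          rw [hs', add_comm, mul_comm, Int.add_mul_emod_self_right, Int.emod_eq_of_lt hr0 hcase]
        rw [hdiv, hmod]
        have : (((k+1 : Nat) : Int) - r).toNat = (((k : Nat) : Int) - r).toNat + 1 := by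
          push_cast; omega
        rw [this, List.replicate_succ]
        simp [hq]
      · -- r = k : quotient becomes q+1, remainder 0
        have hsk : s - q = (k : Int) * (q + 1) := by
          rw [hs']; linear_combination hcase
        have hdiv : (s - q) / (k : Int) = q + 1 := by
          rw [hsk, Int.mul_ediv_cancel_left _ (by omega : (k:Int) ≠ 0)]
        have hmod : (s - q) % (k : Int) = 0 := by
          rw [hsk, Int.mul_emod_right]
        rw [hdiv, hmod]
        have h1 : (((k+1 : Nat) : Int) - r).toNat = 1 := by push_cast; omega
        have h2 : r.toNat = k := by omega
        rw [h1, h2]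
        simp [hq, List.replicate_succ]

-- ===== VERDICT (by name: the statement is the Claim_ definition above) =====
theorem solution_spec : Claim_equal_solution := by
  intro n s _ hpre
  unfold Spec_solution solution solution_alt
  split_ifs with h1 h2
  · rfl
  · subst h2; rfl
  · -- n ≠ 0, ¬(s = 1 ∨ n > s) : so 0 < n ≤ s
    have hn : 0 < n := by
      rcases hpre with h | h | h
      · omega
      · exact absurd (by omega : n > s) (by tauto)
      · exact absurd (Or.inl h) (by tauto)
    obtain ⟨k, hk⟩ : ∃ k : Nat, n = (k : Int) := ⟨n.toNat, by omega⟩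
    subst hk
    have hk1 : 1 ≤ k := by exact_mod_cast hn
    have htn : ((k : Int)).toNat = k := by simp
    rw [htn, solutionLoop_closed k s hk1,
        PySem.Int.floordiv_eq_ediv_of_pos hn, PySem.Int.mod_eq_emod_of_pos hn]
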